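-- pv_equiv track=rewrite | github.com/Sanchitanwar0007/10X-Pyhton-and-Java-Code | Sorted_pairs.py | sorted_pairs
-- ===== SOURCE A (Python) =====
-- def merge(arr,left,mid,right):
--     i=left
--     j=mid+1
--     k=0
--     temp=[0]*(right-left+1)
--     count=0
--     while(i<=mid and j<=right):
--         if(arr[i]<=arr[j]):
--             temp[k]=arr[i]
--             i+=1
--             count+=right-j+1
--         else:
--             temp[k]=arr[j]   #[2 3 4 5 6 ]
--             # count+=(mid-i+1)  [2 3 4 5] [0 1 2 3]
--             j+=1
--         k+=1
--     while(i<=mid):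
--         temp[k]=arr[i]
--         i+=1
--         k+=1
--         # count+=1
--     while(j<=right):
--         temp[k]=arr[j]
--         j+=1
--         k+=1
--     for i in range(left,right+1):
--         arr[i]=temp[i-left]
--     return count
--
-- def sorted_pairs(arr,left,right):
--     in_count=0
--     if(left<right):
--         mid=(left+right)//2
--         in_count+=sorted_pairs(arr,left,mid)
--         in_count+=sorted_pairs(arr,mid+1,right)
--         in_count+=merge(arr,left,mid,right)
--     return in_count
-- ===== SOURCE B (Python) =====
-- def _pairs(seg):
--     count = 0
--     tail = seg
--     while tail:
--         head, tail = tail[0], tail[1:]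
--         count += sum(1 for y in tail if head <= y)
--     return count
--
-- def sorted_pairs(arr, left, right):
--     if left >= right:
--         return 0
--     seg = arr[left:right + 1]
--     count = _pairs(seg)
--     arr[left:right + 1] = sorted(seg)
--     return count
-- ===== Notes on version B (the rewrite author's own statement) =====
-- stated objective: simpler
-- what changed: Replaces the merge-sort divide-and-conquer (recursive splitting plus a counting merge with three while loops and an in-place copy-back) by a direct head-against-tail count of pairs (i<j, seg[i]<=seg[j]) over the extracted slice, with a single library sort reproducing A's in-place mutation.
-- outside the precondition, e.g. on sorted_pairs([3, 1], -2, 1): A returns 4, B returns 0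
import Mathlib
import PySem

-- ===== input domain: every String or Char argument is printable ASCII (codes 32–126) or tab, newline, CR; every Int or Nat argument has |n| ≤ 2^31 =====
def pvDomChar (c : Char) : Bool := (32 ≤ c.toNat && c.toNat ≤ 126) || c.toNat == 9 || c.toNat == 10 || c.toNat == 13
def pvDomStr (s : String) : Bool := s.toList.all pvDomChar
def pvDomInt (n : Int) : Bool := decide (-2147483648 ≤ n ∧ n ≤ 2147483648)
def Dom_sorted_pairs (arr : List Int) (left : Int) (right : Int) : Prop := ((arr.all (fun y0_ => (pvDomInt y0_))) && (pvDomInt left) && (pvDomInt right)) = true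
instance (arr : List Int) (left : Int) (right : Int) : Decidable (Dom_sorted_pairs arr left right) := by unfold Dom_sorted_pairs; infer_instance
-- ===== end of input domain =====

-- B replaces A's counting merge sort by a direct recursive pair count over the slice (simpler
-- decomposition, not faster); both Pythons mutate arr identically (slice sorted ascending) —
-- the equivalence proved here is about the RETURN value.

-- ===== PORT A =====
-- while loops are ported with a fuel parameter (structural recursion); callers pass fuel
-- equal to the loop's iteration bound, so the guard, not the fuel, ends every loop
-- first while loop of merge: both runs nonempty
def mergeLoop1 (arr : List Int) (mid right : Int) :
    Nat → Int → Int → Int → List Int → Int → Int × Int × Int × List Int × Int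
  | 0, i, j, k, temp, count => (i, j, k, temp, count)
  | fuel+1, i, j, k, temp, count =>
    if i ≤ mid ∧ j ≤ right then
      if PySem.List.pyGetD arr i 0 ≤ PySem.List.pyGetD arr j 0 then
        mergeLoop1 arr mid right fuel (i+1) j (k+1)
          (PySem.List.pySetD temp k (PySem.List.pyGetD arr i 0)) (count + (right - j + 1))
      else
        mergeLoop1 arr mid right fuel i (j+1) (k+1)
          (PySem.List.pySetD temp k (PySem.List.pyGetD arr j 0)) count
    else (i, j, k, temp, count)

-- second while loop: drain the left run
def mergeLoop2 (arr : List Int) (mid : Int) : Nat → Int → Int → List Int → Int × Int × List Int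
  | 0, i, k, temp => (i, k, temp)
  | fuel+1, i, k, temp =>
    if i ≤ mid then
      mergeLoop2 arr mid fuel (i+1) (k+1) (PySem.List.pySetD temp k (PySem.List.pyGetD arr i 0))
    else (i, k, temp)

-- third while loop: drain the right run
def mergeLoop3 (arr : List Int) (right : Int) : Nat → Int → Int → List Int → Int × Int × List Int
  | 0, j, k, temp => (j, k, temp)
  | fuel+1, j, k, temp =>
    if j ≤ right then
      mergeLoop3 arr right fuel (j+1) (k+1) (PySem.List.pySetD temp k (PySem.List.pyGetD arr j 0))
    else (j, k, temp)

-- the three while loops run in sequence: returns (final temp, count from loop 1)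
def chainRun (arr : List Int) (mid right i j k : Int) (temp : List Int) (count : Int) :
    List Int × Int :=
  let r1 := mergeLoop1 arr mid right ((mid + 1 - i) + (right + 1 - j)).toNat i j k temp count
  let r2 := mergeLoop2 arr mid (mid + 1 - r1.1).toNat r1.1 r1.2.2.1 r1.2.2.2.1
  let r3 := mergeLoop3 arr right (right + 1 - r1.2.1).toNat r1.2.1 r2.2.1 r2.2.2
  (r3.2.2, r1.2.2.2.2)

-- Python's merge(arr, left, mid, right): returns (arr after copy-back, count)
def mergeA (arr : List Int) (left mid right : Int) : List Int × Int :=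
  let temp := List.replicate (right - left + 1).toNat (0 : Int)
  let lr := chainRun arr mid right left (mid+1) 0 temp 0
  let arr' := (PySem.List.pyRange left (right+1) 1).foldl
      (fun a t => PySem.List.pySetD a t (PySem.List.pyGetD lr.1 (t - left) 0)) arr
  (arr', lr.2)

-- Python's sorted_pairs, state-passing (arr is mutated in place): returns (arr, in_count)
def sortedPairsAux : Nat → List Int → Int → Int → List Int × Int
  | 0, arr, _, _ => (arr, 0)
  | fuel+1, arr, left, right =>
    if left < right then
      let mid := PySem.Int.floordiv (left + right) 2
      let r1 := sortedPairsAux fuel arr left mid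
      let r2 := sortedPairsAux fuel r1.1 (mid+1) right
      let r3 := mergeA r2.1 left mid right
      (r3.1, r1.2 + r2.2 + r3.2)
    else (arr, 0)

def sorted_pairs (arr : List Int) (left : Int) (right : Int) : Int :=
  (sortedPairsAux (right - left).toNat arr left right).2

-- ===== PORT B =====
-- Source B's _pairs: head-against-tail pair count over successive suffixes (the while loop's
-- state (tail, count) becomes structural recursion on the list)
def pairsB : List Int → Int
  | [] => 0
  | x :: t => ((t.countP (fun y => decide (x ≤ y)) : Nat) : Int) + pairsB t

def sorted_pairs_alt (arr : List Int) (left : Int) (right : Int) : Int :=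
  if left ≥ right then 0
  else pairsB (PySem.List.slice arr (some left) (some (right + 1)))

-- ===== PRECONDITION & SPEC =====
-- Pre_ excludes inputs with left < right whose bounds leave [0, len): there A either raises
-- IndexError or, when a negative bound wraps around, returns a count of Python's accidental
-- wrapped reads — a quirk of negative indexing, not a value of the subrange the task is about.
def Pre_sorted_pairs (arr : List Int) (left : Int) (right : Int) : Prop :=
  right ≤ left ∨ (0 ≤ left ∧ right < (arr.length : Int))
instance (arr : List Int) (left : Int) (right : Int) : Decidable (Pre_sorted_pairs arr left right) := by
  unfold Pre_sorted_pairs; infer_instance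

def pvWitness_sorted_pairs : List Int × Int × Int := ([3, 1, 2, 2], 0, 3)

def Spec_sorted_pairs (arr : List Int) (left : Int) (right : Int) (out : Int) : Prop := out = sorted_pairs_alt arr left right
instance (arr : List Int) (left : Int) (right : Int) (out : Int) : Decidable (Spec_sorted_pairs arr left right out) := by unfold Spec_sorted_pairs; infer_instance

-- ===== CLAIM (what is proved, stated in full; the proofs are below) =====
def Claim_equal_sorted_pairs : Prop := ∀ (arr : List Int) (left : Int) (right : Int), Dom_sorted_pairs arr left right → Pre_sorted_pairs arr left right → Spec_sorted_pairs arr left right (sorted_pairs arr left right)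

-- ===== LEMMAS AND PROOFS =====

-- cross count: for each a in X, how many b in Y have a ≤ b
def crossI (X Y : List Int) : Int :=
  (X.map (fun a => ((Y.countP (fun y => decide (a ≤ y)) : Nat) : Int))).sum

-- list-level model of loop 1's merge-and-count
def lmerge : List Int → List Int → List Int × Int
  | [], R => (R, 0)
  | L, [] => (L, 0)
  | a :: L, b :: R =>
    if a ≤ b then
      let p := lmerge L (b :: R)
      (a :: p.1, p.2 + ((R.length + 1 : Nat) : Int))
    else
      let p := lmerge (a :: L) R
      (b :: p.1, p.2)
termination_by L R => L.length + R.length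

theorem pyGetD_append_cons (P T : List Int) (c : Int) (i : Int) (hi : i = (P.length : Int)) :
    PySem.List.pyGetD (P ++ c :: T) i 0 = c := by
  subst hi; simp [PySem.List.pyGetD_natCast, List.getD]
theorem pySetD_append_cons (P T : List Int) (c v : Int) (k : Int) (hk : k = (P.length : Int)) :
    PySem.List.pySetD (P ++ c :: T) k v = P ++ v :: T := by
  subst hk; simp
theorem loop3_spec (Rj : List Int) : ∀ (P S done : List Int) (right j k : Int),
    j = (P.length : Int) → right + 1 = j + (Rj.length : Int) → k = (done.length : Int) →
    mergeLoop3 (P ++ (Rj ++ S)) right Rj.length j k (done ++ List.replicate Rj.length 0)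
      = (right + 1, k + (Rj.length : Int), done ++ Rj) := by
  induction Rj with
  | nil =>
    intro P S done right j k hj hr hk
    simp only [List.length_nil, Nat.cast_zero] at hr
    have h2 : j = right + 1 := by omega
    simp [mergeLoop3, h2]
  | cons a Rj ih =>
    intro P S done right j k hj hr hk
    simp only [List.length_cons]
    rw [mergeLoop3, if_pos (by simp at hr ⊢; omega)]
    have h1 : PySem.List.pyGetD (P ++ ((a :: Rj) ++ S)) j 0 = a :=
      pyGetD_append_cons P (Rj ++ S) a j hj
    rw [h1]
    have h2 : PySem.List.pySetD (done ++ List.replicate (Rj.length + 1) 0) k a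
        = (done ++ [a]) ++ List.replicate Rj.length 0 := by
      rw [List.replicate_succ,
        pySetD_append_cons done (List.replicate Rj.length 0) 0 a k hk]
      simp
    rw [h2]
    have h3 : P ++ ((a :: Rj) ++ S) = (P ++ [a]) ++ (Rj ++ S) := by simp
    rw [h3]
    rw [ih (P ++ [a]) S (done ++ [a]) right (j+1) (k+1) (by simp [hj]) (by simp at hr ⊢; omega)
      (by simp [hk])]
    have hlen : k + 1 + (Rj.length : Int) = k + ((a :: Rj).length : Int) := by
      simp; ring
    rw [show (done ++ [a]) ++ Rj = done ++ a :: Rj by simp, hlen]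
    simp
theorem loop2_spec (Li : List Int) : ∀ (P S done : List Int) (mid i k : Int),
    i = (P.length : Int) → mid + 1 = i + (Li.length : Int) → k = (done.length : Int) →
    mergeLoop2 (P ++ (Li ++ S)) mid Li.length i k (done ++ List.replicate Li.length 0)
      = (mid + 1, k + (Li.length : Int), done ++ Li) := by
  induction Li with
  | nil =>
    intro P S done mid i k hi hm hk
    simp only [List.length_nil, Nat.cast_zero] at hm
    have h2 : i = mid + 1 := by omega
    simp [mergeLoop2, h2]
  | cons a Li ih =>
    intro P S done mid i k hi hm hk
    simp only [List.length_cons]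
    rw [mergeLoop2, if_pos (by simp at hm ⊢; omega)]
    have h1 : PySem.List.pyGetD (P ++ ((a :: Li) ++ S)) i 0 = a :=
      pyGetD_append_cons P (Li ++ S) a i hi
    rw [h1]
    have h2 : PySem.List.pySetD (done ++ List.replicate (Li.length + 1) 0) k a
        = (done ++ [a]) ++ List.replicate Li.length 0 := by
      rw [List.replicate_succ,
        pySetD_append_cons done (List.replicate Li.length 0) 0 a k hk]
      simp
    rw [h2]
    have h3 : P ++ ((a :: Li) ++ S) = (P ++ [a]) ++ (Li ++ S) := by simp
    rw [h3]
    rw [ih (P ++ [a]) S (done ++ [a]) mid (i+1) (k+1) (by simp [hi]) (by simp at hm ⊢; omega)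
      (by simp [hk])]
    have hlen : k + 1 + (Li.length : Int) = k + ((a :: Li).length : Int) := by
      simp; ring
    rw [show (done ++ [a]) ++ Li = done ++ a :: Li by simp, hlen]
    simp
theorem lmerge_perm (L R : List Int) : (lmerge L R).1.Perm (L ++ R) := by
  fun_induction lmerge L R with
  | case1 R => simp
  | case2 L h => simp
  | case3 a L b R hab p ih => simpa using ih.cons a
  | case4 a L b R hab p ih => exact (ih.cons b).trans List.perm_middle.symm
theorem lmerge_sorted (L R : List Int) (hL : L.Pairwise (· ≤ ·)) (hR : R.Pairwise (· ≤ ·)) :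
    (lmerge L R).1.Pairwise (· ≤ ·) := by
  fun_induction lmerge L R with
  | case1 R => exact hR
  | case2 L h => exact hL
  | case3 a L b R hab p ih =>
    refine List.Pairwise.cons ?_ (ih hL.of_cons hR)
    intro x hx
    have := (lmerge_perm L (b :: R)).mem_iff.mp hx
    rcases List.mem_append.mp this with h1 | h2
    · exact List.rel_of_pairwise_cons hL h1
    · rcases List.mem_cons.mp h2 with rfl | h2
      · exact hab
      · exact le_trans hab (List.rel_of_pairwise_cons hR h2)
  | case4 a L b R hab p ih =>
    refine List.Pairwise.cons ?_ (ih hL hR.of_cons)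
    intro x hx
    have := (lmerge_perm (a :: L) R).mem_iff.mp hx
    have hba : b ≤ a := le_of_not_ge hab
    rcases List.mem_append.mp this with h1 | h2
    · rcases List.mem_cons.mp h1 with rfl | h1
      · exact hba
      · exact le_trans hba (List.rel_of_pairwise_cons hL h1)
    · exact List.rel_of_pairwise_cons hR h2
theorem lmerge_count (L R : List Int) (hL : L.Pairwise (· ≤ ·)) (hR : R.Pairwise (· ≤ ·)) :
    (lmerge L R).2 = crossI L R := by
  fun_induction lmerge L R with
  | case1 R => simp [crossI]
  | case2 L h => simp [crossI]
  | case3 a L b R hab p ih =>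
    have hcnt : (b :: R).countP (fun y => decide (a ≤ y)) = R.length + 1 := by
      rw [show R.length + 1 = (b :: R).length from rfl, List.countP_eq_length]
      intro y hy
      rcases List.mem_cons.mp hy with rfl | h
      · simpa using hab
      · simpa using le_trans hab (List.rel_of_pairwise_cons hR h)
    simp only [crossI, List.map_cons, List.sum_cons]
    rw [ih hL.of_cons hR, hcnt]
    simp only [crossI]
    omega
  | case4 a L b R hab p ih =>
    have hba : b < a := lt_of_not_ge hab
    rw [ih hL hR.of_cons]
    unfold crossI
    congr 1
    apply List.map_congr_left
    intro x hx
    have hbx : b < x := by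
      rcases List.mem_cons.mp hx with rfl | h
      · exact hba
      · exact lt_of_lt_of_le hba (List.rel_of_pairwise_cons hL h)
    have : (b :: R).countP (fun y => decide (x ≤ y)) = R.countP (fun y => decide (x ≤ y)) := by
      simp [List.countP_cons, not_le.mpr hbx]
    rw [this]
theorem pairsB_append (X Y : List Int) :
    pairsB (X ++ Y) = pairsB X + pairsB Y + crossI X Y := by
  induction X with
  | nil => simp [pairsB, crossI]
  | cons x X ih =>
    simp only [List.cons_append, pairsB, ih, crossI, List.map_cons, List.sum_cons,
      List.countP_append]
    push_cast
    ring
theorem crossI_perm {X X' Y Y' : List Int} (hX : X.Perm X') (hY : Y.Perm Y') :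
    crossI X Y = crossI X' Y' := by
  unfold crossI
  have hmap : ∀ Z : List Int, Z.map (fun a => ((Y.countP (fun y => decide (a ≤ y)) : Nat) : Int))
      = Z.map (fun a => ((Y'.countP (fun y => decide (a ≤ y)) : Nat) : Int)) := by
    intro Z
    apply List.map_congr_left
    intro a _
    rw [hY.countP_eq]
  rw [hmap]
  exact (hX.map _).sum_eq
theorem mergeLoop1_exit {arr : List Int} {mid right : Int} (fuel : Nat) {i j k : Int}
    {temp : List Int} {count : Int} (h : ¬ (i ≤ mid ∧ j ≤ right)) :
    mergeLoop1 arr mid right fuel i j k temp count = (i, j, k, temp, count) := by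
  cases fuel
  · rfl
  · rw [mergeLoop1, if_neg h]

theorem chainRun_congr {arr : List Int} {mid r i j k count i' j' k' count' : Int} {t t' : List Int}
    (h : mergeLoop1 arr mid r ((mid + 1 - i) + (r + 1 - j)).toNat i j k t count
       = mergeLoop1 arr mid r ((mid + 1 - i') + (r + 1 - j')).toNat i' j' k' t' count') :
    chainRun arr mid r i j k t count = chainRun arr mid r i' j' k' t' count' := by
  simp only [chainRun, h]
theorem chainRun_spec (N : Nat) : ∀ (Li Rj P Q S done : List Int) (mid r i j k count : Int),
    Li.length + Rj.length = N →
    i = (P.length : Int) → mid + 1 = i + (Li.length : Int) →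
    j = mid + 1 + (Q.length : Int) → r + 1 = j + (Rj.length : Int) →
    k = (done.length : Int) →
    chainRun (P ++ Li ++ Q ++ Rj ++ S) mid r i j k
        (done ++ List.replicate (Li.length + Rj.length) 0) count
      = (done ++ (lmerge Li Rj).1, count + (lmerge Li Rj).2) := by
  induction N using Nat.strong_induction_on with
  | _ N ih =>
  intro Li Rj P Q S done mid r i j k count hN hi hm hj hr hk
  match Li, Rj with
  | [], Rj =>
    simp only [List.length_nil, Nat.cast_zero] at hm
    simp only [chainRun]
    rw [mergeLoop1_exit _ (by omega)]
    dsimp only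
    rw [show (mid + 1 - i).toNat = 0 by omega]
    simp only [mergeLoop2]
    rw [show (r + 1 - j).toNat = Rj.length by omega]
    have harr : P ++ [] ++ Q ++ Rj ++ S = (P ++ Q) ++ (Rj ++ S) := by simp
    have htemp : done ++ List.replicate (([] : List Int).length + Rj.length) 0
        = done ++ List.replicate Rj.length 0 := by simp
    rw [harr, htemp,
      loop3_spec Rj (P ++ Q) S done r j k (by simp [hj, hm, hi]) hr hk]
    simp [lmerge]
  | a :: Li', [] =>
    simp only [List.length_nil, Nat.cast_zero] at hr
    simp only [chainRun]
    rw [mergeLoop1_exit _ (by omega)]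
    dsimp only
    rw [show (mid + 1 - i).toNat = (a :: Li').length by
      simp only [List.length_cons] at hm ⊢; push_cast at hm ⊢; omega]
    have harr : P ++ (a :: Li') ++ Q ++ [] ++ S = P ++ ((a :: Li') ++ (Q ++ S)) := by simp
    have htemp : done ++ List.replicate ((a :: Li').length + ([] : List Int).length) 0
        = done ++ List.replicate (a :: Li').length 0 := by simp
    rw [harr, htemp, loop2_spec (a :: Li') P (Q ++ S) done mid i k hi hm hk]
    dsimp only
    rw [show (r + 1 - j).toNat = 0 by omega]
    simp only [mergeLoop3]
    simp [lmerge]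
  | a :: Li', b :: Rj' =>
    have hiP : PySem.List.pyGetD (P ++ (a :: Li') ++ Q ++ (b :: Rj') ++ S) i 0 = a := by
      rw [show P ++ (a :: Li') ++ Q ++ (b :: Rj') ++ S
          = P ++ a :: (Li' ++ Q ++ (b :: Rj') ++ S) by simp]
      exact pyGetD_append_cons _ _ _ _ hi
    have hjP : PySem.List.pyGetD (P ++ (a :: Li') ++ Q ++ (b :: Rj') ++ S) j 0 = b := by
      rw [show P ++ (a :: Li') ++ Q ++ (b :: Rj') ++ S
          = (P ++ (a :: Li') ++ Q) ++ b :: (Rj' ++ S) by simp]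
      refine pyGetD_append_cons _ _ _ _ ?_
      simp [hj, hm, hi]; push_cast; ring
    have hguard : i ≤ mid ∧ j ≤ r := by
      simp only [List.length_cons] at hm hr
      constructor <;> [skip; skip] <;> push_cast at hm hr <;> omega
    obtain ⟨hg1, hg2⟩ := hguard
    by_cases hab : a ≤ b
    · -- take from the left run
      have htemp : done ++ List.replicate ((a :: Li').length + (b :: Rj').length) 0
          = done ++ 0 :: List.replicate (Li'.length + (b :: Rj').length) 0 := by
        rw [show (a :: Li').length + (b :: Rj').length
            = (Li'.length + (b :: Rj').length) + 1 by simp; omega, List.replicate_succ]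
      have hset : PySem.List.pySetD
          (done ++ List.replicate ((a :: Li').length + (b :: Rj').length) 0) k a
          = (done ++ [a]) ++ List.replicate (Li'.length + (b :: Rj').length) 0 := by
        rw [htemp, pySetD_append_cons done _ 0 a k hk]; simp
      have hfe : ((mid + 1 - i) + (r + 1 - j)).toNat
          = (((mid + 1 - (i+1)) + (r + 1 - j)).toNat) + 1 := by omega
      have hstep : mergeLoop1 (P ++ (a :: Li') ++ Q ++ (b :: Rj') ++ S) mid r
            ((mid + 1 - i) + (r + 1 - j)).toNat i j k
            (done ++ List.replicate ((a :: Li').length + (b :: Rj').length) 0) count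
          = mergeLoop1 (P ++ (a :: Li') ++ Q ++ (b :: Rj') ++ S) mid r
            ((mid + 1 - (i+1)) + (r + 1 - j)).toNat (i+1) j (k+1)
            ((done ++ [a]) ++ List.replicate (Li'.length + (b :: Rj').length) 0)
            (count + (r - j + 1)) := by
        conv_lhs => rw [hfe, mergeLoop1]
        rw [if_pos ⟨hg1, hg2⟩, hiP, hjP, if_pos hab, hset]
      rw [chainRun_congr hstep]
      rw [show P ++ (a :: Li') ++ Q ++ (b :: Rj') ++ S
          = (P ++ [a]) ++ Li' ++ Q ++ (b :: Rj') ++ S by simp]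
      rw [ih (Li'.length + (b :: Rj').length) (by simp at hN ⊢; omega) Li' (b :: Rj')
        (P ++ [a]) Q S (done ++ [a]) mid r (i+1) j (k+1) (count + (r - j + 1)) rfl
        (by simp [hi]) (by simp at hm ⊢; push_cast; omega) hj hr (by simp [hk])]
      rw [show lmerge (a :: Li') (b :: Rj') =
          (a :: (lmerge Li' (b :: Rj')).1, (lmerge Li' (b :: Rj')).2 + ((Rj'.length + 1 : Nat) : Int))
          from by rw [lmerge, if_pos hab]]
      simp only [Prod.mk.injEq]
      constructor
      · simp
      · simp only [List.length_cons] at hr; push_cast at hr ⊢; omega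
    · -- take from the right run
      have htemp : done ++ List.replicate ((a :: Li').length + (b :: Rj').length) 0
          = done ++ 0 :: List.replicate ((a :: Li').length + Rj'.length) 0 := by
        rw [show (a :: Li').length + (b :: Rj').length
            = ((a :: Li').length + Rj'.length) + 1 by simp only [List.length_cons]; omega,
          List.replicate_succ]
      have hset : PySem.List.pySetD
          (done ++ List.replicate ((a :: Li').length + (b :: Rj').length) 0) k b
          = (done ++ [b]) ++ List.replicate ((a :: Li').length + Rj'.length) 0 := by
        rw [htemp, pySetD_append_cons done _ 0 b k hk]; simp
      have hfe : ((mid + 1 - i) + (r + 1 - j)).toNat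
          = (((mid + 1 - i) + (r + 1 - (j+1))).toNat) + 1 := by omega
      have hstep : mergeLoop1 (P ++ (a :: Li') ++ Q ++ (b :: Rj') ++ S) mid r
            ((mid + 1 - i) + (r + 1 - j)).toNat i j k
            (done ++ List.replicate ((a :: Li').length + (b :: Rj').length) 0) count
          = mergeLoop1 (P ++ (a :: Li') ++ Q ++ (b :: Rj') ++ S) mid r
            ((mid + 1 - i) + (r + 1 - (j+1))).toNat i (j+1) (k+1)
            ((done ++ [b]) ++ List.replicate ((a :: Li').length + Rj'.length) 0) count := by
        conv_lhs => rw [hfe, mergeLoop1]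
        rw [if_pos ⟨hg1, hg2⟩, hiP, hjP, if_neg hab, hset]
      rw [chainRun_congr hstep]
      rw [show P ++ (a :: Li') ++ Q ++ (b :: Rj') ++ S
          = P ++ (a :: Li') ++ (Q ++ [b]) ++ Rj' ++ S by simp]
      rw [ih ((a :: Li').length + Rj'.length) (by simp at hN ⊢; omega) (a :: Li') Rj'
        P (Q ++ [b]) S (done ++ [b]) mid r i (j+1) (k+1) count rfl
        hi hm (by simp [hj]; push_cast; ring) (by simp at hr ⊢; push_cast; omega) (by simp [hk])]
      rw [show lmerge (a :: Li') (b :: Rj') =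
          (b :: (lmerge (a :: Li') Rj').1, (lmerge (a :: Li') Rj').2)
          from by rw [lmerge, if_neg hab]]
      simp
theorem copy_spec (Cur : List Int) : ∀ (P S temp3 : List Int) (l i r : Int),
    i = (P.length : Int) → r + 1 = i + (Cur.length : Int) → l ≤ i →
    (temp3.length : Int) = r + 1 - l →
    (PySem.List.pyRange i (r+1) 1).foldl
        (fun a t => PySem.List.pySetD a t (PySem.List.pyGetD temp3 (t - l) 0)) (P ++ Cur ++ S)
      = P ++ temp3.drop (i - l).toNat ++ S := by
  induction Cur with
  | nil =>
    intro P S temp3 l i r hi hr hl hlen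
    simp only [List.length_nil, Nat.cast_zero] at hr
    rw [PySem.List.pyRange_one_eq_nil (by omega)]
    simp only [List.foldl_nil]
    rw [List.drop_of_length_le (by omega)]
  | cons c Cur ih =>
    intro P S temp3 l i r hi hr hl hlen
    simp only [List.length_cons] at hr
    push_cast at hr
    rw [PySem.List.pyRange_one_cons (by omega)]
    simp only [List.foldl_cons]
    have hlt : (i - l).toNat < temp3.length := by omega
    obtain ⟨v, rest, hdrop⟩ : ∃ v rest, temp3.drop (i - l).toNat = v :: rest := by
      cases hD : temp3.drop (i - l).toNat with
      | nil =>
        have hld : (temp3.drop ((i - l).toNat)).length = temp3.length - (i - l).toNat :=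
          List.length_drop
        rw [hD] at hld
        simp at hld
        omega
      | cons v rest => exact ⟨v, rest, rfl⟩
    have hv : PySem.List.pyGetD temp3 (i - l) 0 = v := by
      rw [show i - l = (((i - l).toNat : Nat) : Int) by omega, PySem.List.pyGetD_natCast]
      have hh : (temp3.drop ((i - l).toNat)).head? = temp3[(i - l).toNat]? :=
        List.head?_drop
      rw [hdrop] at hh
      simp [List.getD, ← hh]
    have hset : PySem.List.pySetD (P ++ ((c :: Cur) ++ S)) i (PySem.List.pyGetD temp3 (i - l) 0)
        = P ++ v :: (Cur ++ S) := by
      rw [hv]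
      exact pySetD_append_cons P (Cur ++ S) c v i hi
    rw [show P ++ (c :: Cur) ++ S = P ++ ((c :: Cur) ++ S) by simp, hset]
    rw [show P ++ v :: (Cur ++ S) = (P ++ [v]) ++ Cur ++ S by simp]
    rw [ih (P ++ [v]) S temp3 l (i+1) r (by simp [hi]) (by push_cast; omega) (by omega)
      (by omega)]
    have hdrop1 : temp3.drop ((i + 1) - l).toNat = rest := by
      rw [show ((i + 1) - l).toNat = (i - l).toNat + 1 by omega, ← List.drop_drop, hdrop]
      rfl
    rw [hdrop1, hdrop]
    simp
theorem mergeA_spec (P L R S : List Int) (l mid r : Int)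
    (hl : l = (P.length : Int)) (hm : mid + 1 = l + (L.length : Int))
    (hr : r + 1 = mid + 1 + (R.length : Int)) :
    mergeA (P ++ L ++ R ++ S) l mid r
      = (P ++ (lmerge L R).1 ++ S, (lmerge L R).2) := by
  simp only [mergeA]
  have htemp : List.replicate (r - l + 1).toNat (0 : Int)
      = ([] : List Int) ++ List.replicate (L.length + R.length) 0 := by
    rw [show (r - l + 1).toNat = L.length + R.length by push_cast at hm hr; omega]
    simp
  rw [htemp]
  rw [show P ++ L ++ R ++ S = P ++ L ++ [] ++ R ++ S by simp]
  rw [chainRun_spec (L.length + R.length) L R P [] S [] mid r l (mid+1) 0 0 rfl hl hm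
    (by simp) (by push_cast; omega) (by simp)]
  dsimp only
  have hperm := lmerge_perm L R
  have hlenm : ((lmerge L R).1.length : Int) = r + 1 - l := by
    rw [hperm.length_eq]
    push_cast [List.length_append]
    omega
  rw [show P ++ L ++ [] ++ R ++ S = P ++ (L ++ R) ++ S by simp]
  rw [List.nil_append]
  rw [copy_spec (L ++ R) P S ((lmerge L R).1) l l r hl
    (by push_cast [List.length_append]; omega) le_rfl hlenm]
  simp
theorem aux_spec (fuel : Nat) : ∀ (seg pre post : List Int) (l r : Int),
    (r - l).toNat ≤ fuel → l = (pre.length : Int) → r + 1 = l + (seg.length : Int) →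
    ∃ s : List Int, s.Pairwise (· ≤ ·) ∧ s.Perm seg ∧
      sortedPairsAux fuel (pre ++ seg ++ post) l r = (pre ++ s ++ post, pairsB seg) := by
  induction fuel with
  | zero =>
    intro seg pre post l r hn hl hr
    have hlen1 : seg.length ≤ 1 := by omega
    match seg, hlen1 with
    | [], _ =>
      exact ⟨[], by simp, by simp, by simp [sortedPairsAux, pairsB]⟩
    | [x], _ =>
      exact ⟨[x], by simp, by simp, by simp [sortedPairsAux, pairsB]⟩
  | succ fuel ih =>
  intro seg pre post l r hn hl hr
  by_cases hlr : l < r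
  · have hd := PySem.Int.floordiv_mul_add_mod (l + r) 2
    have h0 := PySem.Int.mod_nonneg (l + r) (b := 2) (by omega)
    have h1 := PySem.Int.mod_lt (l + r) (b := 2) (by omega)
    set mid := PySem.Int.floordiv (l + r) 2 with hmid
    have hmb : l ≤ mid ∧ mid < r := by omega
    have hseglen : (seg.length : Int) = r + 1 - l := by omega
    set segL := seg.take (mid + 1 - l).toNat with hsegL
    set segR := seg.drop (mid + 1 - l).toNat with hsegR
    have hLlen : (segL.length : Int) = mid + 1 - l := by
      simp [hsegL, List.length_take]; omega
    have hRlen : (segR.length : Int) = r - mid := by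
      simp [hsegR, List.length_drop]; omega
    obtain ⟨s1, hs1s, hs1p, heq1⟩ := ih segL pre (segR ++ post) l mid
      (by omega) hl (by omega)
    have hs1len : (s1.length : Int) = mid + 1 - l := by rw [hs1p.length_eq]; omega
    obtain ⟨s2, hs2s, hs2p, heq2⟩ := ih segR (pre ++ s1) post
      (mid + 1) r (by omega) (by push_cast [List.length_append]; omega) (by omega)
    have hs2len : (s2.length : Int) = r - mid := by rw [hs2p.length_eq]; omega
    have hsplit : seg = segL ++ segR := (List.take_append_drop _ _).symm
    rw [sortedPairsAux, if_pos hlr, ← hmid]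
    dsimp only
    have harr : pre ++ seg ++ post = pre ++ segL ++ (segR ++ post) := by
      rw [hsplit]; simp [List.append_assoc]
    rw [harr, heq1]
    dsimp only
    rw [show pre ++ s1 ++ (segR ++ post) = pre ++ s1 ++ segR ++ post by simp, heq2]
    dsimp only
    rw [mergeA_spec pre s1 s2 post l mid r hl (by omega) (by omega)]
    dsimp only
    refine ⟨(lmerge s1 s2).1, lmerge_sorted s1 s2 hs1s hs2s, ?_, ?_⟩
    · refine (lmerge_perm s1 s2).trans ?_
      refine (hs1p.append hs2p).trans ?_
      rw [hsplit]
    · have hc : pairsB segL + pairsB segR + (lmerge s1 s2).2 = pairsB seg := by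
        rw [lmerge_count s1 s2 hs1s hs2s, crossI_perm hs1p hs2p,
          show pairsB seg = pairsB (segL ++ segR) by rw [← hsplit],
          pairsB_append segL segR]
      rw [hc]
  · have hlen1 : seg.length ≤ 1 := by omega
    match seg, hlen1 with
    | [], _ =>
      exact ⟨[], by simp, by simp, by rw [sortedPairsAux, if_neg hlr]; simp [pairsB]⟩
    | [x], _ =>
      exact ⟨[x], by simp, by simp, by rw [sortedPairsAux, if_neg hlr]; simp [pairsB]⟩

-- ===== VERDICT (by name: the statement is the Claim_ definition above) =====
theorem sorted_pairs_spec : Claim_equal_sorted_pairs := by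
  unfold Claim_equal_sorted_pairs
  intro arr l r hdom hpre
  unfold Spec_sorted_pairs
  by_cases hlr : l < r
  · obtain ⟨hl0, hrlen⟩ : 0 ≤ l ∧ r < (arr.length : Int) := by
      rcases hpre with h | h
      · omega
      · exact h
    set pre := arr.take l.toNat with hpre'
    set seg := (arr.drop l.toNat).take ((r + 1 - l).toNat) with hseg'
    set post := (arr.drop l.toNat).drop ((r + 1 - l).toNat) with hpost'
    have harr : pre ++ seg ++ post = arr := by
      rw [hpre', hseg', hpost', List.append_assoc, List.take_append_drop, List.take_append_drop]
    have hprelen : l = (pre.length : Int) := by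
      rw [hpre']; simp [List.length_take]; omega
    have hseglen : r + 1 = l + (seg.length : Int) := by
      rw [hseg']; simp [List.length_take, List.length_drop]; omega
    obtain ⟨s, _, _, heq⟩ := aux_spec ((r - l).toNat) seg pre post l r le_rfl hprelen hseglen
    have hslice : PySem.List.slice arr (some l) (some (r + 1)) = seg := by
      rw [PySem.List.slice_toNat arr (by omega) (by omega), hseg']
      congr 1
      omega
    rw [show sorted_pairs arr l r = (sortedPairsAux ((r - l).toNat) (pre ++ seg ++ post) l r).2 by
      rw [sorted_pairs, harr], heq]
    rw [sorted_pairs_alt, if_neg (by omega), hslice]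
  · rw [sorted_pairs, show (r - l).toNat = 0 by omega, sorted_pairs_alt, if_pos (by omega)]
    rfl
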